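-- pv_equiv track=rewrite | github.com/dmtAndIvanson/dmtAnd_YandexAlgorithmTraining | t10/Ya2/C/C.py | find_near_num
-- ===== SOURCE A (Python) =====
-- def find_near_num(size, seq, number):
--     """Find the closest to number number2 in sequence.
--        If there is two numbers, returns both."""
--
--     l_num = seq[0] # Closest number that less than number.
--     r_num = seq[0] # Closest number that more than number.
--
--     for i in range(1, size):
--         if seq[i] == number:
--             return (number,)
--
--         elif abs(number - seq[i]) < abs(number - l_num):
--             l_num = seq[i]
--             r_num = seq[i]
--
--         elif abs(number - seq[i]) == abs(number - l_num):
--             if l_num == r_num: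
--                 if seq[i] < number:
--                     l_num = seq[i]
--                 else:
--                     r_num = seq[i]
--
--     if l_num == r_num:
--         return (l_num,)
--
--     else:
--         return (l_num, r_num)
-- ===== SOURCE B (Python) =====
-- def find_near_num(size, seq, number):
--     """Find the closest to number number2 in sequence.
--        If there is two numbers, returns both."""
--     prefix = seq[:max(size, 1)]
--     d = min(abs(number - x) for x in prefix)
--     if d == 0:
--         return (number,)
--     return tuple(v for v in (number - d, number + d) if v in prefix)
-- ===== Notes on version B (the rewrite author's own statement) =====
-- stated objective: simpler
-- what changed: A maintains a left/right candidate pair with four-way tie-handling branches in one stateful scan; B first computes the minimum absolute distance d over the scanned prefix and then returns whichever of number-d and number+d occur in it, eliminating the candidate-state machine.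
import Mathlib
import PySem

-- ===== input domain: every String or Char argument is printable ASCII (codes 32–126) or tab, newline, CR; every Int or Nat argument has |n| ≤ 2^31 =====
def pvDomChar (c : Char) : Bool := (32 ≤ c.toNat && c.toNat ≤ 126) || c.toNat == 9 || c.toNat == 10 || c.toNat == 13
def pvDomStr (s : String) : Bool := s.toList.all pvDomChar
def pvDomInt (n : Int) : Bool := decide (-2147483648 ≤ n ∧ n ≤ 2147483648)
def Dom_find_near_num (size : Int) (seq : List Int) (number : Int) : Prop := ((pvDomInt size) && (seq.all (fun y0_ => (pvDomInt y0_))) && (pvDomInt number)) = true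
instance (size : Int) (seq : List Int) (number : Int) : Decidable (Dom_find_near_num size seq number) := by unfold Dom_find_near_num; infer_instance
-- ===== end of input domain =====

-- B replaces A's stateful left/right candidate pair and its tie branches by
-- "minimum distance over the prefix, then membership of number±d" (simpler; same O(n)).

-- ===== PORT A =====
-- the loop body of A over the remaining index list, state (l_num, r_num)
def find_near_num_go (number : Int) (seq : List Int) : List Int → Int → Int → List Int
  | [], l, r => if l = r then [l] else [l, r]
  | i :: is, l, r =>
    let x := (PySem.List.pyGet? seq i).getD 0   -- seq[i]; Pre_ keeps every index in range
    if x = number then [number]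
    else if |number - x| < |number - l| then find_near_num_go number seq is x x
    else if |number - x| = |number - l| then
      if l = r then
        if x < number then find_near_num_go number seq is x r
        else find_near_num_go number seq is l x
      else find_near_num_go number seq is l r
    else find_near_num_go number seq is l r

def find_near_num (size : Int) (seq : List Int) (number : Int) : List Int :=
  let l0 := (PySem.List.pyGet? seq 0).getD 0    -- seq[0]; Pre_ keeps seq nonempty
  find_near_num_go number seq (PySem.List.pyRange 1 size 1) l0 l0

-- ===== PORT B =====
-- B's core on the prefix: minimum distance, then keep number±d that occur
def find_near_num_core (number : Int) (p : List Int) : List Int :=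
  let d := (PySem.List.min? (p.map (fun x => |number - x|)) (fun y => y)).getD 0
  if d = 0 then [number]
  else ([number - d, number + d]).filter (fun v => p.contains v)

def find_near_num_alt (size : Int) (seq : List Int) (number : Int) : List Int :=
  find_near_num_core number (PySem.List.slice seq none (some (max size 1)))

-- ===== PRECONDITION & SPEC =====
-- exactly the inputs on which A returns: seq[0] exists and every index 1..size-1 is in range
def Pre_find_near_num (size : Int) (seq : List Int) (number : Int) : Prop :=
  seq ≠ [] ∧ size ≤ (seq.length : Int)
instance (size : Int) (seq : List Int) (number : Int) : Decidable (Pre_find_near_num size seq number) := by unfold Pre_find_near_num; infer_instance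

def pvWitness_find_near_num : Int × List Int × Int := (2, [1, 4], 3)

def Spec_find_near_num (size : Int) (seq : List Int) (number : Int) (out : List Int) : Prop := out = find_near_num_alt size seq number
instance (size : Int) (seq : List Int) (number : Int) (out : List Int) : Decidable (Spec_find_near_num size seq number out) := by unfold Spec_find_near_num; infer_instance

-- ===== CLAIM (what is proved, stated in full; the proofs are below) =====
def Claim_equal_find_near_num : Prop := ∀ (size : Int) (seq : List Int) (number : Int), Dom_find_near_num size seq number → Pre_find_near_num size seq number → Spec_find_near_num size seq number (find_near_num size seq number)
-- ===== LEMMAS AND PROOFS =====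

-- A's loop over the fetched elements directly
def goE (number : Int) : List Int → Int → Int → List Int
  | [], l, r => if l = r then [l] else [l, r]
  | x :: xs, l, r =>
    if x = number then [number]
    else if |number - x| < |number - l| then goE number xs x x
    else if |number - x| = |number - l| then
      if l = r then
        if x < number then goE number xs x r else goE number xs l x
      else goE number xs l r
    else goE number xs l r

theorem go_eq_goE (number : Int) (seq : List Int) :
    ∀ (is : List Int) (l r : Int),
      find_near_num_go number seq is l r
        = goE number (is.map (fun i => (PySem.List.pyGet? seq i).getD 0)) l r := by
  intro is
  induction is with
  | nil => intro l r; rfl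
  | cons i is ih =>
    intro l r
    simp only [find_near_num_go, goE, List.map_cons, ih]

-- loop invariant of A's scan over the already-processed elements S
def LoopInv (number : Int) (S : List Int) (l r : Int) : Prop :=
  l ∈ S ∧ r ∈ S ∧ (∀ y ∈ S, |number - l| ≤ |number - y|) ∧ |number - r| = |number - l| ∧
  (if l = number then r = number
   else if l = r then ∀ y ∈ S, |number - y| = |number - l| → y = l
   else l = number - |number - l| ∧ r = number + |number - l|)

theorem min?_id_eq {L : List Int} {c : Int} (hc : c ∈ L) (hle : ∀ y ∈ L, c ≤ y) :
    PySem.List.min? L (fun y => y) = some c := by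
  cases hL : PySem.List.min? L (fun y => y) with
  | none =>
    rw [PySem.List.min?_eq_none_iff] at hL
    subst hL; cases hc
  | some m =>
    have hm := PySem.List.min?_mem hL
    have hmin := PySem.List.min?_isMin hL
    have h1 : m ≤ c := hmin c hc
    have h2 := hle m hm
    have : m = c := le_antisymm h1 h2
    rw [this]

theorem core_of_mem {number : Int} {L : List Int} (h : number ∈ L) :
    find_near_num_core number L = [number] := by
  have h0 : (0 : Int) ∈ L.map (fun x => |number - x|) := by
    exact List.mem_map.mpr ⟨number, h, by simp⟩
  have hle : ∀ y ∈ L.map (fun x => |number - x|), (0 : Int) ≤ y := by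
    intro y hy
    obtain ⟨x, _, rfl⟩ := List.mem_map.mp hy
    exact abs_nonneg _
  unfold find_near_num_core
  rw [min?_id_eq h0 hle]
  simp

theorem core_of_inv {number : Int} {S : List Int} {l r : Int} (h : LoopInv number S l r) :
    find_near_num_core number S = if l = r then [l] else [l, r] := by
  obtain ⟨hl, hr, hmin, hrd, hbr⟩ := h
  have hd : (PySem.List.min? (S.map (fun x => |number - x|)) (fun y => y)) = some |number - l| := by
    apply min?_id_eq (List.mem_map.mpr ⟨l, hl, rfl⟩)
    intro y hy
    obtain ⟨x, hx, rfl⟩ := List.mem_map.mp hy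
    exact hmin x hx
  unfold find_near_num_core
  rw [hd]
  simp only [Option.getD_some]
  have habs1 : |number - (number - |number - l|)| = |number - l| := by
    rw [show number - (number - |number - l|) = |number - l| by ring]
    exact abs_of_nonneg (abs_nonneg _)
  have habs2 : |number - (number + |number - l|)| = |number - l| := by
    rw [show number - (number + |number - l|) = -|number - l| by ring, abs_neg]
    exact abs_of_nonneg (abs_nonneg _)
  by_cases hln : l = number
  · subst hln
    rw [if_pos rfl] at hbr
    subst hbr
    simp
  · have hdne : |number - l| ≠ 0 := by
      intro h0; apply hln; have := abs_eq_zero.mp h0; omega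
    rw [if_neg hdne]
    rw [if_neg hln] at hbr
    by_cases hlr : l = r
    · rw [if_pos hlr]
      rw [if_pos hlr] at hbr
      have habs : l = number - |number - l| ∨ l = number + |number - l| := by
        rcases abs_cases (number - l) with ⟨h1, _⟩ | ⟨h1, _⟩ <;> omega
      rcases habs with hcase | hcase
      · have m2 : number + |number - l| ∉ S := by
          intro hc
          have := hbr _ hc habs2
          omega
        rw [← hcase]
        simp [List.filter, hl, m2]
      · have m1 : number - |number - l| ∉ S := by
          intro hc
          have := hbr _ hc habs1
          omega
        rw [← hcase]
        simp [List.filter, hl, m1]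
    · rw [if_neg hlr]
      rw [if_neg hlr] at hbr
      obtain ⟨hbl, hbrr⟩ := hbr
      rw [← hbl, ← hbrr]
      simp [List.filter, hl, hr]

theorem goE_eq_core (number : Int) :
    ∀ (xs S : List Int) (l r : Int), LoopInv number S l r →
      goE number xs l r = find_near_num_core number (S ++ xs) := by
  intro xs
  induction xs with
  | nil =>
    intro S l r h
    rw [List.append_nil, core_of_inv h]
    rfl
  | cons x xs ih =>
    intro S l r h
    obtain ⟨hl, hr, hmin, hrd, hbr⟩ := h
    have hSx : S ++ x :: xs = (S ++ [x]) ++ xs := by simp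
    simp only [goE]
    by_cases hx : x = number
    · rw [if_pos hx]
      have hmem : number ∈ S ++ x :: xs := by rw [← hx]; simp
      exact (core_of_mem hmem).symm
    · rw [if_neg hx]
      have hdx0 : |number - x| ≠ 0 := by
        intro h0; exact hx (by have := abs_eq_zero.mp h0; omega)
      by_cases h1 : |number - x| < |number - l|
      · -- strictly closer: state becomes (x, x)
        rw [if_pos h1, hSx]
        apply ih
        refine ⟨by simp, by simp, ?_, rfl, ?_⟩
        · intro y hy
          rcases List.mem_append.mp hy with hy | hy
          · have := hmin y hy; omega
          · simp at hy; subst hy; omega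
        · rw [if_neg hx, if_pos rfl]
          intro y hy hyd
          rcases List.mem_append.mp hy with hy | hy
          · have := hmin y hy; omega
          · simpa using hy
      · rw [if_neg h1]
        by_cases h2 : |number - x| = |number - l|
        · rw [if_pos h2]
          -- tie: l is not number (else both distances are 0 and x = number)
          have hln : l ≠ number := by
            intro he; subst he; simp at h2; exact hx (by omega)
          rw [if_neg hln] at hbr
          by_cases hlr : l = r
          · rw [if_pos hlr]
            rw [if_pos hlr] at hbr
            by_cases hxn : x < number
            · -- new state (x, r)
              rw [if_pos hxn, hSx]
              apply ih
              have hxval : x = number - |number - x| := by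
                have : |number - x| = number - x := abs_of_pos (by omega)
                omega
              refine ⟨by simp, by simp [hr], ?_, by omega, ?_⟩
              · intro y hy
                rcases List.mem_append.mp hy with hy | hy
                · have := hmin y hy; omega
                · simp at hy; subst hy; omega
              · rw [if_neg hx]
                by_cases hxr : x = r
                · rw [if_pos hxr]
                  intro y hy hyd
                  rcases List.mem_append.mp hy with hy | hy
                  · have := hbr y hy (by omega)
                    omega
                  · simpa using hy
                · rw [if_neg hxr]
                  constructor
                  · omega
                  · -- r = l must be number + d
                    rcases abs_cases (number - l) with ⟨hc, _⟩ | ⟨hc, _⟩ <;> omega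
            · -- new state (l, x), x > number
              rw [if_neg hxn, hSx]
              apply ih
              have hxval : x = number + |number - x| := by
                have : |number - x| = -(number - x) := abs_of_neg (by omega)
                omega
              refine ⟨by simp [hl], by simp, ?_, by omega, ?_⟩
              · intro y hy
                rcases List.mem_append.mp hy with hy | hy
                · have := hmin y hy; omega
                · simp at hy; subst hy; omega
              · rw [if_neg hln]
                by_cases hlx : l = x
                · rw [if_pos hlx]
                  intro y hy hyd
                  rcases List.mem_append.mp hy with hy | hy
                  · exact hbr y hy hyd
                  · simp at hy; omega
                · rw [if_neg hlx]
                  constructor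
                  · rcases abs_cases (number - l) with ⟨hc, _⟩ | ⟨hc, _⟩ <;> omega
                  · omega
          · -- tie but both sides already recorded: skip
            rw [if_neg hlr, hSx]
            rw [if_neg hlr] at hbr
            apply ih
            refine ⟨by simp [hl], by simp [hr], ?_, hrd, ?_⟩
            · intro y hy
              rcases List.mem_append.mp hy with hy | hy
              · exact hmin y hy
              · simp at hy; subst hy; omega
            · rw [if_neg hln, if_neg hlr]
              exact hbr
        · -- strictly farther: skip
          rw [if_neg h2, hSx]
          apply ih
          refine ⟨by simp [hl], by simp [hr], ?_, hrd, ?_⟩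
          · intro y hy
            rcases List.mem_append.mp hy with hy | hy
            · exact hmin y hy
            · simp at hy; subst hy; omega
          · by_cases hln : l = number
            · rw [if_pos hln]
              rw [if_pos hln] at hbr
              exact hbr
            · rw [if_neg hln]
              rw [if_neg hln] at hbr
              by_cases hlr : l = r
              · rw [if_pos hlr]
                rw [if_pos hlr] at hbr
                intro y hy hyd
                rcases List.mem_append.mp hy with hy | hy
                · exact hbr y hy hyd
                · simp at hy; subst hy; omega
              · rw [if_neg hlr]
                rw [if_neg hlr] at hbr
                exact hbr

-- the fetched elements of indices j..j+m-1 are the corresponding sublist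
theorem fetch_range (seq : List Int) :
    ∀ (m : Nat) (j : Int), 0 ≤ j → j.toNat + m ≤ seq.length →
      (List.range m).map (fun k : Nat => (PySem.List.pyGet? seq (j + (k : Int))).getD 0)
        = (seq.drop j.toNat).take m := by
  intro m
  induction m with
  | zero => intro j _ _; simp
  | succ m ih =>
    intro j hj hm
    rw [List.range_succ, List.map_append, ih j hj (by omega), List.take_succ]
    have hjm : j.toNat + m < seq.length := by omega
    have hget : PySem.List.pyGet? seq (j + (m : Int)) = some seq[j.toNat + m] := by
      rw [show j + (m : Int) = ((j.toNat + m : Nat) : Int) by omega,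
        PySem.List.pyGet?_natCast]
      simp [hjm]
    simp [hget, List.getElem?_drop, hjm]

theorem prefix_eq (seq : List Int) (n : Nat) (h1 : 1 ≤ n) (h2 : n ≤ seq.length) :
    ((PySem.List.pyGet? seq 0).getD 0)
        :: (PySem.List.pyRange 1 (n : Int) 1).map (fun i => (PySem.List.pyGet? seq i).getD 0)
      = seq.take n := by
  rw [PySem.List.pyRange_one, List.map_map]
  have hn : ((n : Int) - 1).toNat = n - 1 := by omega
  rw [hn]
  have hfr := fetch_range seq (n - 1) 1 (by omega) (by simp; omega)
  simp only [Function.comp_def] at hfr ⊢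
  rw [hfr]
  cases seq with
  | nil => simp at h2; omega
  | cons a t =>
    rw [PySem.List.pyGet?_zero_cons]
    simp only [Option.getD_some, List.drop_one, List.tail_cons]
    cases n with
    | zero => omega
    | succ m => simp

-- ===== VERDICT (by name: the statement is the Claim_ definition above) =====
theorem find_near_num_spec : Claim_equal_find_near_num := by
  intro size seq number _ hPre
  obtain ⟨hne, hlen⟩ := hPre
  have hlen1 : 1 ≤ seq.length := by
    cases seq with
    | nil => exact absurd rfl hne
    | cons a t => simp
  unfold Spec_find_near_num find_near_num find_near_num_alt
  rw [go_eq_goE]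
  set l0 := (PySem.List.pyGet? seq 0).getD 0 with hl0
  have hInv : LoopInv number [l0] l0 l0 := by
    refine ⟨by simp, by simp, by intro y hy; simp at hy; rw [hy], rfl, ?_⟩
    by_cases h : l0 = number
    · rw [if_pos h]; exact h
    · rw [if_neg h, if_pos rfl]
      intro y hy _
      simpa using hy
  rw [goE_eq_core number _ [l0] l0 l0 hInv]
  congr 1
  have hk0 : (0 : Int) ≤ max size 1 := by omega
  rw [PySem.List.slice_to seq hk0]
  set k : Nat := (max size 1).toNat with hk
  have hk1 : 1 ≤ k := by omega
  have hk2 : k ≤ seq.length := by omega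
  by_cases hs : size ≤ 1
  · have hks : k = 1 := by omega
    have hr : PySem.List.pyRange 1 size 1 = [] := by
      rw [PySem.List.pyRange_one]
      have : (size - 1).toNat = 0 := by omega
      rw [this]; simp
    rw [hr, hks]
    simpa using prefix_eq seq 1 le_rfl hlen1
  · have hks : (k : Int) = size := by omega
    have : PySem.List.pyRange 1 size 1 = PySem.List.pyRange 1 ((k : Nat) : Int) 1 := by
      rw [hks]
    rw [this]
    exact prefix_eq seq k hk1 hk2
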